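-- pv_equiv track=rewrite | github.com/yanivle/bot3 | util.py | divide_lines_by_prefix
-- ===== SOURCE A (Python) =====
-- def divide_lines_by_prefix(lines, prefixes):
--     res = {}
--     for prefix in prefixes:
--         res[prefix] = []
--     res[None] = []
--     for line in lines:
--         found_prefix = False
--         for prefix in prefixes:
--             if line.startswith(prefix):
--                 res[prefix].append(line)
--                 found_prefix = True
--                 break
--         if not found_prefix:
--             res[None].append(line)
--     return res
-- ===== SOURCE B (Python) =====
-- def divide_lines_by_prefix(lines, prefixes):
--     res = {}
--     remaining = lines
--     for p in prefixes:
--         if p not in res: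
--             res[p] = []
--         res[p].extend(l for l in remaining if l.startswith(p))
--         remaining = [l for l in remaining if not l.startswith(p)]
--     res[None] = remaining
--     return res
-- ===== Notes on version B (the rewrite author's own statement) =====
-- stated objective: alternative
-- what changed: A scans the whole prefix list per line (first match wins); B makes one pass per prefix over a shrinking list of still-unclaimed lines, moving each prefix's matches into its bucket at once.
import Mathlib
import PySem

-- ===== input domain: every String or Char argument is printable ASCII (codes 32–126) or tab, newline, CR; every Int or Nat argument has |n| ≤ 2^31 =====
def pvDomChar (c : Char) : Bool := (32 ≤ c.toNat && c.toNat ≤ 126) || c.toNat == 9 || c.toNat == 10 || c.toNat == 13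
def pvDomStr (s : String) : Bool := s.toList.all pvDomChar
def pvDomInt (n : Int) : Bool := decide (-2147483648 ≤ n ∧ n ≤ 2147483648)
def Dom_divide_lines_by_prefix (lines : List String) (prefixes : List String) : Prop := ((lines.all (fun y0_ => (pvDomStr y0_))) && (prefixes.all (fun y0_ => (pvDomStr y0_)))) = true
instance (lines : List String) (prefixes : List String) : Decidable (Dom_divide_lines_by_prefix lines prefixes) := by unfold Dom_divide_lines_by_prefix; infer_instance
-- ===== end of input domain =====

-- B replaces A's per-line scan over all prefixes by one pass per prefix over a shrinking
-- list of unclaimed lines (objective: alternative decomposition, same asymptotic cost).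

-- ===== PORT A =====
-- inner 'for prefix in prefixes: … break' loop of A (break = stop at first matching prefix)
def pvAScan (line : String) : List String → PySem.Dict (Option String) (List String) → PySem.Dict (Option String) (List String)
  | [], d => d.modify none [] (fun v => v ++ [line])
  | p :: ps, d =>
    if PySem.Str.startswith line p then d.modify (some p) [] (fun v => v ++ [line])
    else pvAScan line ps d

def divide_lines_by_prefix (lines : List String) (prefixes : List String) : List (Option String × List String) :=
  let res0 := prefixes.foldl (fun d p => d.insert (some p) ([] : List String)) PySem.Dict.empty
  let res1 := res0.insert none []
  let res2 := lines.foldl (fun d line => pvAScan line prefixes d) res1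
  res2.items

-- ===== PORT B =====
-- one pass of B's 'for p in prefixes' loop: open p's bucket if new, move the matching
-- remaining lines into it, and drop them from 'remaining'
def pvBStep (st : PySem.Dict (Option String) (List String) × List String) (p : String) :
    PySem.Dict (Option String) (List String) × List String :=
  let res := if st.1.contains (some p) then st.1 else st.1.insert (some p) []
  let res := res.modify (some p) [] (fun v => v ++ st.2.filter (fun l => PySem.Str.startswith l p))
  (res, st.2.filter (fun l => !PySem.Str.startswith l p))

def divide_lines_by_prefix_alt (lines : List String) (prefixes : List String) : List (Option String × List String) :=
  let st := prefixes.foldl pvBStep (PySem.Dict.empty, lines)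
  (st.1.insert none st.2).items

-- ===== PRECONDITION & SPEC =====
def Spec_divide_lines_by_prefix (lines : List String) (prefixes : List String) (out : List (Option String × List String)) : Prop := out = divide_lines_by_prefix_alt lines prefixes
instance (lines : List String) (prefixes : List String) (out : List (Option String × List String)) : Decidable (Spec_divide_lines_by_prefix lines prefixes out) := by unfold Spec_divide_lines_by_prefix; infer_instance

-- ===== CLAIM (what is proved, stated in full; the proofs are below) =====
def Claim_equal_divide_lines_by_prefix : Prop := ∀ (lines : List String) (prefixes : List String), Dom_divide_lines_by_prefix lines prefixes → Spec_divide_lines_by_prefix lines prefixes (divide_lines_by_prefix lines prefixes)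

-- ===== LEMMAS AND PROOFS =====

-- the (Option String)-valued key a line is bucketed under: the first matching prefix, else none
def pvFM (ps : List String) (l : String) : Option String :=
  ps.find? (fun p => PySem.Str.startswith l p)

theorem pvAScan_eq_modify (l : String) (ps : List String)
    (d : PySem.Dict (Option String) (List String)) :
    pvAScan l ps d = d.modify (pvFM ps l) [] (fun v => v ++ [l]) := by
  induction ps with
  | nil => simp [pvAScan, pvFM]
  | cons p ps ih =>
    cases h : PySem.Chars.startswith l.toList p.toList <;>
      simp [pvAScan, pvFM, PySem.Str.startswith, h, ih]

theorem pvFM_cons (p : String) (ps : List String) (l : String) :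
    pvFM (p :: ps) l =
      if PySem.Chars.startswith l.toList p.toList then some p else pvFM ps l := by
  cases h : PySem.Chars.startswith l.toList p.toList <;>
    simp [pvFM, PySem.Str.startswith, h]

theorem pvFM_some_sw {ps : List String} {l q : String} (h : pvFM ps l = some q) :
    PySem.Chars.startswith l.toList q.toList = true := by
  simpa [PySem.Str.startswith] using List.find?_some h

theorem pvFM_cons_beq (p : String) (ps : List String) (l : String) :
    (pvFM (p :: ps) l == some p) = PySem.Chars.startswith l.toList p.toList := by
  rw [pvFM_cons]
  cases h : PySem.Chars.startswith l.toList p.toList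
  · rw [if_neg (by simp [h])]
    cases hf : pvFM ps l with
    | none => simp
    | some r =>
      by_cases hr : r = p
      · subst hr; exact absurd (pvFM_some_sw hf) (by simp [h])
      · simp [hr]
  · simp

theorem pvA_fold_getD (ps : List String) (lines : List String)
    (d : PySem.Dict (Option String) (List String)) (c : Option String) :
    (lines.foldl (fun d line => pvAScan line ps d) d).getD c [] =
      d.getD c [] ++ lines.filter (fun l => pvFM ps l == c) := by
  simp only [pvAScan_eq_modify]
  have h : lines.foldl (fun d line => d.modify (pvFM ps line) [] (fun v => v ++ [line])) d
      = ((lines.map (fun l => (pvFM ps l, l))).foldl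
          (fun d p => d.modify p.1 [] (fun v => v ++ [p.2])) d) := by
    rw [List.foldl_map]
  rw [h, PySem.Dict.getD_foldl_modify_append, List.filter_map, List.map_map]
  simp [Function.comp_def]

theorem pvSet_update_of_subset {s : List (Option String)} {xs : List (Option String)}
    (h : ∀ x ∈ xs, x ∈ s) : PySem.Set.update s xs = s := by
  induction xs generalizing s with
  | nil => rfl
  | cons x xs ih =>
    have hx : PySem.Set.add s x = s := by
      have hmem : x ∈ s := h x (by simp)
      simp [PySem.Set.add, hmem]
    show PySem.Set.update (PySem.Set.add s x) xs = s
    rw [hx]; exact ih (fun y hy => h y (by simp [hy]))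

theorem pvFM_mem_keys (prefixes : List String) (l : String) :
    pvFM prefixes l ∈
      (((prefixes.foldl (fun d p => d.insert (some p) ([] : List String)) PySem.Dict.empty).insert
        none ([] : List String)).keys) := by
  rw [PySem.Dict.keys_insert_of_not_contains]
  · cases hf : pvFM prefixes l with
    | none => simp
    | some p =>
      have hp : p ∈ prefixes := List.mem_of_find?_eq_some hf
      rw [PySem.Dict.keys_foldl_insert_key prefixes (fun p => some p)]
      simp [PySem.Set.mem_update, hp]
  · rw [Bool.eq_false_iff]
    intro hc
    rw [PySem.Dict.contains_iff_mem_keys] at hc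
    rw [PySem.Dict.keys_foldl_insert_key prefixes (fun p => some p)] at hc
    simp [PySem.Set.mem_update, PySem.Dict.keys_empty] at hc

theorem pvB_fold_snd (prefixes : List String) (lines : List String)
    (d : PySem.Dict (Option String) (List String)) :
    (prefixes.foldl pvBStep (d, lines)).2 =
      lines.filter (fun l => (pvFM prefixes l).isNone) := by
  induction prefixes generalizing d lines with
  | nil => simp [pvFM]
  | cons p ps ih =>
    show (ps.foldl pvBStep (pvBStep (d, lines) p)).2 = _
    rw [show pvBStep (d, lines) p =
      (((if d.contains (some p) then d else d.insert (some p) []).modify (some p) []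
          (fun v => v ++ lines.filter (fun l => PySem.Str.startswith l p))),
        lines.filter (fun l => !PySem.Str.startswith l p)) from rfl]
    rw [ih, List.filter_filter]
    apply List.filter_congr
    intro l _
    rw [pvFM_cons]
    cases h : PySem.Chars.startswith l.toList p.toList <;> simp [h, PySem.Str.startswith]

theorem pvB_fold_getD (prefixes lines : List String)
    (d : PySem.Dict (Option String) (List String)) (q : String) :
    ((prefixes.foldl pvBStep (d, lines)).1).getD (some q) [] =
      d.getD (some q) [] ++ lines.filter (fun l => pvFM prefixes l == some q) := by
  induction prefixes generalizing d lines with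
  | nil => simp [pvFM]
  | cons p ps ih =>
    show ((ps.foldl pvBStep (pvBStep (d, lines) p)).1).getD (some q) [] = _
    rw [show pvBStep (d, lines) p =
      (((if d.contains (some p) then d else d.insert (some p) []).modify (some p) []
          (fun v => v ++ lines.filter (fun l => PySem.Str.startswith l p))),
        lines.filter (fun l => !PySem.Str.startswith l p)) from rfl]
    rw [ih]
    by_cases hq : q = p
    · subst hq
      have hd : ((if d.contains (some q) then d else d.insert (some q) []).modify (some q) []
          (fun v => v ++ lines.filter (fun l => PySem.Str.startswith l q))).getD (some q) [] =
          d.getD (some q) [] ++ lines.filter (fun l => PySem.Str.startswith l q) := by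
        by_cases hc : d.contains (some q) = true
        · simp [hc, PySem.Dict.getD_modify]
        · simp only [Bool.not_eq_true] at hc
          simp [hc, PySem.Dict.getD_modify, PySem.Dict.getD_insert,
            PySem.Dict.getD_of_not_contains d ([] : List String) hc]
      rw [hd, List.append_assoc]
      congr 1
      have hnil : (lines.filter (fun l => !PySem.Str.startswith l q)).filter
          (fun l => pvFM ps l == some q) = [] := by
        rw [List.filter_filter]
        apply List.filter_eq_nil_iff.2
        intro l _ hcontra
        simp only [Bool.and_eq_true, beq_iff_eq] at hcontra
        obtain ⟨hfm, hns⟩ := hcontra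
        simp [PySem.Str.startswith, pvFM_some_sw hfm] at hns
      rw [hnil, List.append_nil]
      apply List.filter_congr
      intro l _
      rw [pvFM_cons_beq]
      simp [PySem.Str.startswith]
    · have hne : (some q : Option String) ≠ some p := by simp [hq]
      have hd : ((if d.contains (some p) then d else d.insert (some p) []).modify (some p) []
          (fun v => v ++ lines.filter (fun l => PySem.Str.startswith l p))).getD (some q) [] =
          d.getD (some q) [] := by
        by_cases hc : d.contains (some p) = true <;>
          simp [hc, PySem.Dict.getD_modify, PySem.Dict.getD_insert, hne]
      rw [hd]
      congr 1
      rw [List.filter_filter]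
      apply List.filter_congr
      intro l _
      rw [pvFM_cons]
      cases h : PySem.Chars.startswith l.toList p.toList
      · simp [h]
      · simp [h, PySem.Str.startswith]
        exact fun hh => hq hh.symm

theorem pvB_fold_keys (prefixes lines : List String)
    (d : PySem.Dict (Option String) (List String)) :
    ((prefixes.foldl pvBStep (d, lines)).1).keys =
      PySem.Set.update d.keys (prefixes.map (fun p => some p)) := by
  induction prefixes generalizing d lines with
  | nil => rfl
  | cons p ps ih =>
    show ((ps.foldl pvBStep (pvBStep (d, lines) p)).1).keys = _
    rw [show pvBStep (d, lines) p =
      (((if d.contains (some p) then d else d.insert (some p) []).modify (some p) []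
          (fun v => v ++ lines.filter (fun l => PySem.Str.startswith l p))),
        lines.filter (fun l => !PySem.Str.startswith l p)) from rfl]
    rw [ih]
    have hkeys : ((if d.contains (some p) then d else d.insert (some p) []).modify (some p) []
        (fun v => v ++ lines.filter (fun l => PySem.Str.startswith l p))).keys =
        PySem.Set.add d.keys (some p) := by
      by_cases hc : d.contains (some p) = true
      · rw [PySem.Dict.keys_modify, PySem.Dict.keys_insert_of_contains _ _ (by simp [hc])]
        simp [hc, PySem.Set.add, ← List.contains_iff_mem,
          (PySem.Dict.contains_iff_mem_keys d (some p)).1 hc]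
      · simp only [Bool.not_eq_true] at hc
        rw [PySem.Dict.keys_modify, PySem.Dict.keys_insert_of_contains _ _ (by simp [hc]),
          if_neg (by simp [hc]), PySem.Dict.keys_insert_of_not_contains _ _ hc]
        have hmem : (some p) ∉ d.keys := fun hm =>
          absurd ((PySem.Dict.contains_iff_mem_keys d (some p)).2 hm) (by simp [hc])
        simp [PySem.Set.add, hmem]
    rw [hkeys]
    rfl

theorem pvInit_getD (ps : List String) (d : PySem.Dict (Option String) (List String))
    (h : ∀ c, d.getD c [] = []) (c : Option String) :
    (ps.foldl (fun d p => d.insert (some p) ([] : List String)) d).getD c [] = [] := by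
  induction ps generalizing d with
  | nil => exact h c
  | cons p ps ih =>
    exact ih (d.insert (some p) []) (fun c => by rw [PySem.Dict.getD_insert]; split <;> simp [h])

-- ===== VERDICT (by name: the statement is the Claim_ definition above) =====
theorem divide_lines_by_prefix_spec : Claim_equal_divide_lines_by_prefix := by
  unfold Claim_equal_divide_lines_by_prefix
  intro lines prefixes _
  unfold Spec_divide_lines_by_prefix divide_lines_by_prefix divide_lines_by_prefix_alt
  simp only []
  set res0 := prefixes.foldl (fun d p => d.insert (some p) ([] : List String)) PySem.Dict.empty with hres0
  set res1 := res0.insert none ([] : List String) with hres1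
  set res2 := lines.foldl (fun d line => pvAScan line prefixes d) res1 with hres2
  set st := prefixes.foldl pvBStep (PySem.Dict.empty, lines) with hst
  -- keys facts
  have hres0keys : res0.keys = PySem.Set.update [] (prefixes.map (fun p => some p)) := by
    rw [hres0, PySem.Dict.keys_foldl_insert_key prefixes (fun p => some p), PySem.Dict.keys_empty]
  have hnonemem : (none : Option String) ∉ res0.keys := by
    rw [hres0keys]; intro h
    rcases (PySem.Set.mem_update [] (prefixes.map (fun p => some p)) none).1 h with h | h <;> simp at h
  have hres1keys : res1.keys = res0.keys ++ [none] := by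
    rw [hres1, PySem.Dict.keys_insert_of_not_contains]
    rw [Bool.eq_false_iff]; intro hc
    exact hnonemem ((PySem.Dict.contains_iff_mem_keys res0 none).1 hc)
  have hres2keys : res2.keys = res1.keys := by
    rw [hres2]
    simp only [pvAScan_eq_modify]
    rw [PySem.Dict.keys_foldl_modify_key lines (fun l => pvFM prefixes l) []
      (fun _ l v => v ++ [l]) res1]
    exact pvSet_update_of_subset (by
      intro x hx
      rcases List.mem_map.1 hx with ⟨l, _, rfl⟩
      exact pvFM_mem_keys prefixes l)
  have hstkeys : st.1.keys = res0.keys := by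
    rw [hst, pvB_fold_keys, PySem.Dict.keys_empty, hres0keys]
  have hBkeys : (st.1.insert none st.2).keys = res0.keys ++ [none] := by
    rw [PySem.Dict.keys_insert_of_not_contains]
    · rw [hstkeys]
    · rw [Bool.eq_false_iff]; intro hc
      exact hnonemem (hstkeys ▸ (PySem.Dict.contains_iff_mem_keys st.1 none).1 hc)
  have hkeyseq : res2.keys = (st.1.insert none st.2).keys := by
    rw [hres2keys, hres1keys, hBkeys]
  -- nodup
  have hnodup0 : res0.keys.Nodup := by
    rw [hres0keys]; exact PySem.Set.nodup_update [] _ (List.nodup_nil)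
  have hnodupA : res2.keys.Nodup := by
    rw [hres2keys, hres1keys]
    refine hnodup0.append (List.nodup_singleton _) ?_
    intro a ha hb
    simp only [List.mem_singleton] at hb
    subst hb
    exact hnonemem ha
  have hnodupB : (st.1.insert none st.2).keys.Nodup := hkeyseq ▸ hnodupA
  -- init getD
  have hres1getD : ∀ c, res1.getD c [] = [] := by
    intro c
    rw [hres1, PySem.Dict.getD_insert]
    split
    · rfl
    · exact pvInit_getD prefixes PySem.Dict.empty (fun c => PySem.Dict.getD_empty c []) c
  -- pointwise getD equality
  have hgetD : ∀ c, res2.getD c [] = (st.1.insert none st.2).getD c [] := by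
    intro c
    rw [hres2, pvA_fold_getD, hres1getD c, List.nil_append]
    cases c with
    | none =>
      rw [PySem.Dict.getD_insert]
      rw [hst, pvB_fold_snd]
      apply List.filter_congr
      intro l _
      cases pvFM prefixes l <;> rfl
    | some q =>
      rw [PySem.Dict.getD_insert, if_neg (by simp)]
      rw [hst, pvB_fold_getD, PySem.Dict.getD_empty, List.nil_append]
  -- items equality
  rw [PySem.Dict.items_eq_map_keys res2 hnodupA ([] : List String),
    PySem.Dict.items_eq_map_keys (st.1.insert none st.2) hnodupB ([] : List String), hkeyseq]
  exact List.map_congr_left (fun k _ => by rw [hgetD k])
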